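-- pv_equiv track=rewrite | github.com/dave-woods/thesis | code/other/clause_parser.py | language_length_count
-- ===== SOURCE A (Python) =====
-- def language_length_count(lang_list):
--     zero_c = 0
--     one_c = 0
--     many_c = 0
--     for lang in lang_list:
--         if len(lang) == 0:
--             zero_c += 1
--         if len(lang) == 1:
--             one_c += 1
--         if len(lang) > 1:
--             many_c += 1
--
--     # 328 1306 6769
--     return {'zero': zero_c, 'one': one_c, 'many': many_c}
-- ===== SOURCE B (Python) =====
-- def language_length_count(lang_list):
--     n = len(lang_list)
--     zero = len([lang for lang in lang_list if not lang])
--     one = len([lang for lang in lang_list if len(lang) == 1])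
--     return {'zero': zero, 'one': one, 'many': n - zero - one}
-- ===== Notes on version B (the rewrite author's own statement) =====
-- stated objective: alternative
-- what changed: Instead of one loop with three branch-incremented accumulators, B counts only the zero and one categories by staged filter passes and derives 'many' arithmetically as the complement n - zero - one, never counting it; correct because the categories partition the list.
import Mathlib
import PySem

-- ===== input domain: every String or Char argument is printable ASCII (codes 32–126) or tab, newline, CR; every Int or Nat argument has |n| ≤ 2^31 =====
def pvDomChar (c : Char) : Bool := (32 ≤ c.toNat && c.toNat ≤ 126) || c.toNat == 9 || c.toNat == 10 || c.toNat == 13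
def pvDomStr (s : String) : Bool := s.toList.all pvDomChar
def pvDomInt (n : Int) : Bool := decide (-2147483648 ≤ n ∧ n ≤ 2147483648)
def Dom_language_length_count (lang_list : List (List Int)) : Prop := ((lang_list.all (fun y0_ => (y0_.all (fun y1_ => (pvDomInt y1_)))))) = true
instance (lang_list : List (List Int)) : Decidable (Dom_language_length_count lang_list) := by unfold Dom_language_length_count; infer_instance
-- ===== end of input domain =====

-- B counts only the 'zero' and 'one' categories by staged filter passes and
-- derives 'many' as the complement n - zero - one; same result, alternative decomposition.

-- ===== PORT A =====
-- the loop body of A: the three independent if-tests, in order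
def stepA (s : Int × Int × Int) (lang : List Int) : Int × Int × Int :=
  let s := if lang.length = 0 then (s.1 + 1, s.2.1, s.2.2) else s
  let s := if lang.length = 1 then (s.1, s.2.1 + 1, s.2.2) else s
  let s := if lang.length > 1 then (s.1, s.2.1, s.2.2 + 1) else s
  s

def language_length_count (lang_list : List (List Int)) : List (String × Int) :=
  let acc := lang_list.foldl stepA (0, 0, 0)
  [("zero", acc.1), ("one", acc.2.1), ("many", acc.2.2)]

-- ===== PORT B =====
def language_length_count_alt (lang_list : List (List Int)) : List (String × Int) :=
  let n : Int := lang_list.length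
  let zero : Int := (lang_list.filter (fun lang => lang.isEmpty)).length
  let one : Int := (lang_list.filter (fun lang => lang.length == 1)).length
  [("zero", zero), ("one", one), ("many", n - zero - one)]

-- ===== PRECONDITION & SPEC =====
def Spec_language_length_count (lang_list : List (List Int)) (out : List (String × Int)) : Prop := out = language_length_count_alt lang_list
instance (lang_list : List (List Int)) (out : List (String × Int)) : Decidable (Spec_language_length_count lang_list out) := by unfold Spec_language_length_count; infer_instance

-- ===== CLAIM (what is proved, stated in full; the proofs are below) =====
def Claim_equal_language_length_count : Prop := ∀ (lang_list : List (List Int)), Dom_language_length_count lang_list → Spec_language_length_count lang_list (language_length_count lang_list)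

-- ===== LEMMAS AND PROOFS =====

-- A's loop computes the three per-category counts, starting from any accumulator.
lemma foldA_eq (l : List (List Int)) (z o m : Int) :
    l.foldl stepA (z, o, m)
    = (z + l.countP (fun x => x.length == 0),
       o + l.countP (fun x => x.length == 1),
       m + l.countP (fun x => x.length > 1)) := by
  induction l generalizing z o m with
  | nil => simp
  | cons a t ih =>
    rw [List.foldl_cons]
    rcases Nat.lt_trichotomy a.length 1 with h | h | h
    · have h0 : a.length = 0 := by omega
      have hs : stepA (z, o, m) a = (z + 1, o, m) := by simp [stepA, h0]
      rw [hs, ih]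
      simp [h0]; omega
    · have hs : stepA (z, o, m) a = (z, o + 1, m) := by simp [stepA, h]
      rw [hs, ih]
      simp [h]; omega
    · have h0 : a.length ≠ 0 := by omega
      have h1 : a.length ≠ 1 := by omega
      have hs : stepA (z, o, m) a = (z, o, m + 1) := by simp [stepA, h0, h1, h]
      rw [hs, ih]
      simp [h0, h1, h]; omega

-- the three length categories partition the list
lemma count_partition (l : List (List Int)) :
    l.countP (fun x => x.length == 0) + l.countP (fun x => x.length == 1)
      + l.countP (fun x => x.length > 1) = l.length := by
  induction l with
  | nil => simp
  | cons a t ih =>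
    simp only [List.countP_cons, List.length_cons]
    rcases Nat.lt_trichotomy a.length 1 with h | h | h
    · have h0 : a.length = 0 := by omega
      simp [h0] at ih ⊢; omega
    · simp [h] at ih ⊢; omega
    · have h0 : a.length ≠ 0 := by omega
      have h1 : a.length ≠ 1 := by omega
      simp [h0, h1, h] at ih ⊢; omega

-- ===== VERDICT (by name: the statement is the Claim_ definition above) =====
theorem language_length_count_spec : Claim_equal_language_length_count := by
  intro l _
  show language_length_count l = language_length_count_alt l
  unfold language_length_count language_length_count_alt
  simp only [foldA_eq, ← List.countP_eq_length_filter]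
  have e0 : l.countP (fun lang => lang.isEmpty) = l.countP (fun x => x.length == 0) := by
    apply List.countP_congr; intro x _; simp [List.isEmpty_iff, List.length_eq_zero_iff]
  have hpart := count_partition l
  simp only [e0, zero_add]
  have hm : ((l.countP (fun x => x.length > 1) : Int))
      = (l.length : Int) - (l.countP (fun x => x.length == 0) : Int)
        - (l.countP (fun x => x.length == 1) : Int) := by omega
  rw [hm]
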